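-- pv_equiv track=rewrite | github.com/coldbeeen/cote_study | programmers/가장 많이 받은 선물_sungwoo.py | solution
-- ===== SOURCE A (Python) =====
-- def solution(friends, gifts):
--
--     friend_dict = {friend: i for i, friend in enumerate(friends)}  # 친구 이름을 인덱스로 대응시키기 위한 딕셔너리(HashMap)
--     gift_matrix = [[0 for _ in range(len(friends))] for _ in range(len(friends))]  # 주고 받은 선물에 대한 행렬
--
--     # 선물 행렬 생성
--     for gift in gifts:
--         giver, taker = map(lambda friend: friend_dict[friend], gift.split())
--         gift_matrix[giver][taker] += 1
--
--     # 선물 지수 구하기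
--     gift_index = [0 for _ in range(len(friends))]
--     for idx in range(len(friends)):
--         give_cnt = sum(gift_matrix[idx])
--         take_cnt = sum([row[idx] for row in gift_matrix])
--         gift_index[idx] = give_cnt - take_cnt
--
--     # 받을 선물 개수 구하기
--     take_result = [0 for _ in range(len(friends))]
--     for i in range(len(friends)):
--         for j in range(len(friends)):
--             if i == j:  # 같은 사람은 건너뛰기
--                 continue
--
--             # 선물을 더 많이 줬거나, 개수가 같으면서 선물 지수가 더 높다면 -> 선물을 받게 됨
--             if (gift_matrix[i][j] > gift_matrix[j][i] or
--                     gift_matrix[i][j] == gift_matrix[j][i] and gift_index[i] > gift_index[j]):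
--                 take_result[i] += 1
--
--     return max(take_result)
-- ===== SOURCE B (Python) =====
-- def solution(friends, gifts):
--     index = {f: i for i, f in enumerate(friends)}
--     n = len(friends)
--     cnt = {}
--     gidx = [0] * n
--     for gift in gifts:
--         a, b = gift.split()
--         g, t = index[a], index[b]
--         cnt[(g, t)] = cnt.get((g, t), 0) + 1
--         gidx[g] += 1
--         gidx[t] -= 1
--     # distinct exchange partners of each friend, from the sparse pair keys
--     seen = set()
--     nbrs = [[] for _ in range(n)]
--     for (g, t) in cnt:
--         if g != t:
--             p = (g, t) if g < t else (t, g)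
--             if p not in seen:
--                 seen.add(p)
--                 nbrs[g].append(t)
--                 nbrs[t].append(g)
--     # first[v] = rank of gift-index value v = number of friends with a strictly smaller value
--     vals = sorted(gidx)
--     first = {}
--     for k in range(n - 1, -1, -1):
--         first[vals[k]] = k
--     # score[i] = rank of i's gift index, corrected on the pairs that actually exchanged gifts
--     scores = []
--     for i in range(n):
--         s = first[gidx[i]]
--         for j in nbrs[i]:
--             a, b = cnt.get((i, j), 0), cnt.get((j, i), 0)
--             beats = a > b or (a == b and gidx[i] > gidx[j])
--             s += (1 if beats else 0) - (1 if gidx[j] < gidx[i] else 0)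
--         scores.append(s)
--     return max(scores)
-- ===== Notes on version B (the rewrite author's own statement) =====
-- stated objective: alternative
-- what changed: B drops A's dense n*n matrix and all-pairs double loop: one parse pass builds a sparse (giver,taker)->count dict and the gift indices, each friend's base score is its rank among the sorted gift indices, and that rank is corrected only on the distinct pairs that actually exchanged gifts (O(m + n log n) work instead of O(n^2), though the harness could not time it).
import Mathlib
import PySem

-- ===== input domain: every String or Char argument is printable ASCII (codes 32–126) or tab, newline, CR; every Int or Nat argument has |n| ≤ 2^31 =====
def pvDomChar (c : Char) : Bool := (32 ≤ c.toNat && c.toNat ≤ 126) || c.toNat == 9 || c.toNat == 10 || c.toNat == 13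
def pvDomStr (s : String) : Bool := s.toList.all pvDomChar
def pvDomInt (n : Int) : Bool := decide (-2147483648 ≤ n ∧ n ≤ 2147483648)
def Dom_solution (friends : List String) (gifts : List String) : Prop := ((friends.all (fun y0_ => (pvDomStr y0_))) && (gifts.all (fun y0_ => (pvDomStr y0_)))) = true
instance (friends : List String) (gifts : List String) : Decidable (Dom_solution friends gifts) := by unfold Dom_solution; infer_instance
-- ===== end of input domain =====

-- B replaces the dense n×n matrix and all-pairs double loop by a sparse pass: a (giver,taker)
-- count dict, rank of each friend's gift index among the sorted gift indices as the base score,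
-- corrected only on the distinct pairs that actually exchanged gifts. Objective: alternative
-- algorithm (asymptotically less work; not timed).

-- ===== PORT A =====
-- A's locals become helper defs (friend_dict, gift_matrix, gift_index, take_result), each a literal transliteration
def solutionFriendDict (friends : List String) : PySem.Dict String Int :=
  (PySem.List.enumerate friends).foldl (fun d p => d.insert p.2 p.1) PySem.Dict.empty

def solutionGiftMatrix (friends : List String) (gifts : List String) : List (List Int) :=
  gifts.foldl (fun m gift =>
    let ws := PySem.Str.split₀ gift
    let giver := (solutionFriendDict friends).getD (PySem.List.pyGetD ws 0 "") 0
    let taker := (solutionFriendDict friends).getD (PySem.List.pyGetD ws 1 "") 0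
    let row := PySem.List.pyGetD m giver []
    PySem.List.pySetD m giver
      (PySem.List.pySetD row taker (PySem.List.pyGetD row taker 0 + 1)))
    (List.replicate friends.length (List.replicate friends.length 0))

def solutionGiftIndex (friends : List String) (gifts : List String) : List Int :=
  (PySem.List.pyRange 0 (friends.length : Int) 1).foldl (fun gi idx =>
    let giveCnt := (PySem.List.pyGetD (solutionGiftMatrix friends gifts) idx []).sum
    let takeCnt := ((solutionGiftMatrix friends gifts).map (fun row => PySem.List.pyGetD row idx 0)).sum
    PySem.List.pySetD gi idx (giveCnt - takeCnt))
    (List.replicate friends.length 0)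

def solutionTakeResult (friends : List String) (gifts : List String) : List Int :=
  (PySem.List.pyRange 0 (friends.length : Int) 1).foldl (fun tr i =>
    (PySem.List.pyRange 0 (friends.length : Int) 1).foldl (fun tr j =>
      if i = j then tr
      else
        if PySem.List.pyGetD (PySem.List.pyGetD (solutionGiftMatrix friends gifts) i []) j 0 >
             PySem.List.pyGetD (PySem.List.pyGetD (solutionGiftMatrix friends gifts) j []) i 0 ∨
           (PySem.List.pyGetD (PySem.List.pyGetD (solutionGiftMatrix friends gifts) i []) j 0 =
              PySem.List.pyGetD (PySem.List.pyGetD (solutionGiftMatrix friends gifts) j []) i 0 ∧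
            PySem.List.pyGetD (solutionGiftIndex friends gifts) i 0 >
              PySem.List.pyGetD (solutionGiftIndex friends gifts) j 0)
        then PySem.List.pySetD tr i (PySem.List.pyGetD tr i 0 + 1)
        else tr) tr)
    (List.replicate friends.length 0)

def solution (friends : List String) (gifts : List String) : Int :=
  (PySem.List.max? (solutionTakeResult friends gifts) (fun x => x)).getD 0

-- ===== PORT B =====
-- index = {friend: i for i, friend in enumerate(friends)}
def solutionAltIndex (friends : List String) : PySem.Dict String Int :=
  (PySem.List.enumerate friends).foldl (fun d p => d.insert p.2 p.1) PySem.Dict.empty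

-- the parse pass: cnt[(g,t)] += 1; gidx[g] += 1; gidx[t] -= 1
def solutionAltCnt (friends : List String) (gifts : List String) :
    PySem.Dict (Int × Int) Int × List Int :=
  gifts.foldl
    (fun st gift =>
      let ws := PySem.Str.split₀ gift
      let g := (solutionAltIndex friends).getD (PySem.List.pyGetD ws 0 "") 0
      let t := (solutionAltIndex friends).getD (PySem.List.pyGetD ws 1 "") 0
      let gidx1 := PySem.List.pySetD st.2 g (PySem.List.pyGetD st.2 g 0 + 1)
      (st.1.insert (g, t) (st.1.getD (g, t) 0 + 1),
       PySem.List.pySetD gidx1 t (PySem.List.pyGetD gidx1 t 0 - 1)))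
    (PySem.Dict.empty, List.replicate friends.length 0)

-- the nbrs pass over the dict's keys (insertion order), with a seen-set of normalized pairs
def solutionAltNbrs (friends : List String) (gifts : List String) :
    PySem.Set (Int × Int) × List (List Int) :=
  ((solutionAltCnt friends gifts).1.keys).foldl
    (fun st p =>
      if p.1 ≠ p.2 then
        let q := if p.1 < p.2 then (p.1, p.2) else (p.2, p.1)
        if q ∈ st.1 then st
        else
          (PySem.Set.add st.1 q,
           let n1 := PySem.List.pySetD st.2 p.1 ((PySem.List.pyGetD st.2 p.1 []) ++ [p.2])
           PySem.List.pySetD n1 p.2 ((PySem.List.pyGetD n1 p.2 []) ++ [p.1]))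
      else st)
    (PySem.Set.empty, List.replicate friends.length [])

-- first[vals[k]] = k for k in range(n-1, -1, -1), vals = sorted(gidx)
def solutionAltFirst (friends : List String) (gifts : List String) : PySem.Dict Int Int :=
  let vals := PySem.List.sorted (solutionAltCnt friends gifts).2 (fun x => x) false
  (PySem.List.pyRange ((friends.length : Int) - 1) (-1) (-1)).foldl
    (fun d k => d.insert (PySem.List.pyGetD vals k 0) k) PySem.Dict.empty

-- scores loop; first[gidx[i]] is ported with getD 0 (the key gidx[i] is always present in first)
def solution_alt (friends : List String) (gifts : List String) : Int :=
  let cnt := (solutionAltCnt friends gifts).1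
  let gidx := (solutionAltCnt friends gifts).2
  let nbrs := (solutionAltNbrs friends gifts).2
  let first := solutionAltFirst friends gifts
  let scores := (PySem.List.pyRange 0 (friends.length : Int) 1).foldl
    (fun scores i =>
      scores ++ [(PySem.List.pyGetD nbrs i []).foldl
        (fun s j =>
          let a := cnt.getD (i, j) 0
          let b := cnt.getD (j, i) 0
          s + (if a > b ∨ (a = b ∧ PySem.List.pyGetD gidx i 0 > PySem.List.pyGetD gidx j 0)
               then 1 else 0)
            - (if PySem.List.pyGetD gidx j 0 < PySem.List.pyGetD gidx i 0 then 1 else 0))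
        (first.getD (PySem.List.pyGetD gidx i 0) 0)]) []
  (PySem.List.max? scores (fun x => x)).getD 0

-- ===== PRECONDITION & SPEC =====
-- Pre_ excludes exactly the inputs where Python A raises: empty friends (max([]) is a
-- ValueError) and gifts that do not split into exactly two names from friends
-- (unpacking ValueError / friend_dict KeyError).
def Pre_solution (friends : List String) (gifts : List String) : Prop :=
  friends ≠ [] ∧ ∀ g ∈ gifts,
    (PySem.Str.split₀ g).length = 2 ∧ ∀ w ∈ PySem.Str.split₀ g, w ∈ friends
instance (friends : List String) (gifts : List String) : Decidable (Pre_solution friends gifts) := by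
  unfold Pre_solution; infer_instance

def pvWitness_solution : List String × List String :=
  (["muzi", "ryan", "frodo"], ["muzi frodo", "ryan muzi", "muzi ryan", "frodo frodo"])

def Spec_solution (friends : List String) (gifts : List String) (out : Int) : Prop := out = solution_alt friends gifts
instance (friends : List String) (gifts : List String) (out : Int) : Decidable (Spec_solution friends gifts out) := by unfold Spec_solution; infer_instance

-- ===== CLAIM (what is proved, stated in full; the proofs are below) =====
def Claim_equal_solution : Prop := ∀ (friends : List String) (gifts : List String), Dom_solution friends gifts → Pre_solution friends gifts → Spec_solution friends gifts (solution friends gifts)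

-- ===== LEMMAS AND PROOFS =====

-- proof-side name for the parsed (giver, taker) index pair of one gift
def pvPk (friends : List String) (g : String) : Int × Int :=
  ((solutionFriendDict friends).getD (PySem.List.pyGetD (PySem.Str.split₀ g) 0 "") 0,
   (solutionFriendDict friends).getD (PySem.List.pyGetD (PySem.Str.split₀ g) 1 "") 0)

-- every enumerate index lies in [start, start + length)
theorem pv_mem_enumerate {α : Type} (xs : List α) (s : Int) (p : Int × α)
    (h : p ∈ PySem.List.enumerate xs s) : s ≤ p.1 ∧ p.1 < s + xs.length := by
  induction xs generalizing s with
  | nil => simp [PySem.List.enumerate] at h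
  | cons x t ih =>
    simp only [PySem.List.enumerate, List.mem_cons] at h
    rcases h with h | h
    · subst h
      refine ⟨le_refl _, ?_⟩
      show s < s + ((x :: t).length : Int)
      simp only [List.length_cons]
      push_cast
      omega
    · have := ih (s + 1) h
      simp only [List.length_cons]
      push_cast
      omega

-- a getD out of the enumerate dict is 0 or an enumerate index
theorem pv_fd_bound (friends : List String) (hN : friends ≠ []) (name : String) :
    0 ≤ (solutionFriendDict friends).getD name 0 ∧ ((solutionFriendDict friends).getD name 0).toNat < friends.length := by
  have hlen : 0 < friends.length := List.length_pos_of_ne_nil hN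
  have key : ∀ (l : List (Int × String)) (d : PySem.Dict String Int),
      (0 ≤ d.getD name 0 ∧ (d.getD name 0).toNat < friends.length) →
      (∀ p ∈ l, 0 ≤ p.1 ∧ p.1 < (friends.length : Int)) →
      0 ≤ (l.foldl (fun d p => d.insert p.2 p.1) d).getD name 0 ∧
        ((l.foldl (fun d p => d.insert p.2 p.1) d).getD name 0).toNat < friends.length := by
    intro l
    induction l with
    | nil => intro d hd _; exact hd
    | cons p t ih =>
      intro d hd hl
      refine ih _ ?_ (fun q hq => hl q (List.mem_cons_of_mem _ hq))
      rw [PySem.Dict.getD_insert]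
      split_ifs with h
      · have := hl p (List.mem_cons_self)
        omega
      · exact hd
  refine key _ _ ?_ ?_
  · rw [PySem.Dict.getD_empty]; omega
  · intro p hp
    have := pv_mem_enumerate friends 0 p hp
    omega

theorem pv_pk_bound (friends : List String) (hN : friends ≠ []) (g : String) :
    (0 ≤ (pvPk friends g).1 ∧ ((pvPk friends g).1).toNat < friends.length) ∧
    (0 ≤ (pvPk friends g).2 ∧ ((pvPk friends g).2).toNat < friends.length) :=
  ⟨pv_fd_bound friends hN _, pv_fd_bound friends hN _⟩

-- value-level names for the quantities both programs compute
def pvStepM (m : List (List Int)) (p : Int × Int) : List (List Int) :=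
  PySem.List.pySetD m p.1
    (PySem.List.pySetD (PySem.List.pyGetD m p.1 []) p.2
      (PySem.List.pyGetD (PySem.List.pyGetD m p.1 []) p.2 0 + 1))

def pvC (friends : List String) (gifts : List String) (a b : Nat) : Int :=
  ((gifts.map (pvPk friends)).count ((a : Int), (b : Int)) : Int)

def pvGidx (friends : List String) (gifts : List String) (a : Nat) : Int :=
  (((gifts.map (pvPk friends)).map Prod.fst).count (a : Int) : Int)
    - (((gifts.map (pvPk friends)).map Prod.snd).count (a : Int) : Int)

def pvWin (friends : List String) (gifts : List String) (i j : Nat) : Bool :=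
  decide (i ≠ j ∧ (pvC friends gifts i j > pvC friends gifts j i ∨
    (pvC friends gifts i j = pvC friends gifts j i ∧
     pvGidx friends gifts i > pvGidx friends gifts j)))

def pvScore (friends : List String) (gifts : List String) (i : Nat) : Int :=
  ((List.range friends.length).countP (pvWin friends gifts i) : Int)

def pvMat (friends : List String) (gifts : List String) : List (List Int) :=
  (List.range friends.length).map (fun a =>
    (List.range friends.length).map (fun b => pvC friends gifts a b))

def pvGiL (friends : List String) (gifts : List String) : List Int :=
  (List.range friends.length).map (pvGidx friends gifts)

theorem pv_ps_bound (friends gifts : List String) (h : friends ≠ []) :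
    ∀ p ∈ gifts.map (pvPk friends),
      (0 ≤ p.1 ∧ p.1.toNat < friends.length) ∧ (0 ≤ p.2 ∧ p.2.toNat < friends.length) := by
  intro p hp
  obtain ⟨g, _, rfl⟩ := List.mem_map.mp hp
  exact pv_pk_bound friends h g

theorem pv_repl_eq {α : Type} (N : Nat) (x : α) :
    List.replicate N x = (List.range N).map (fun _ => x) := by
  rw [List.map_const', List.length_range]

-- setting one cell of a map-over-range list
theorem pv_set_map_range {α : Type} (N : Nat) (f : Nat → α) (k : Nat) (_hk : k < N) (v : α) :
    ((List.range N).map f).set k v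
      = (List.range N).map (fun a => if a = k then v else f a) := by
  apply List.ext_getElem
  · simp
  · intro i h1 h2
    simp only [List.getElem_set, List.getElem_map, List.getElem_range]
    by_cases h : i = k
    · simp [h]
    · rw [if_neg (by omega), if_neg h]

-- a fold that, at each key of a list with Nodup keys, replaces that index by a function of its old value
theorem pv_fold_set_nodup (N : Nat) {α : Type} (key : α → Nat)
    (step : List Int → α → List Int) (u : Nat → Int → Int) :
    ∀ (ks : List α) (f : Nat → Int), (ks.map key).Nodup → (∀ e ∈ ks, key e < N) →
    (∀ (f : Nat → Int), ∀ e ∈ ks,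
      step ((List.range N).map f) e = ((List.range N).map f).set (key e) (u (key e) (f (key e)))) →
    ks.foldl step ((List.range N).map f)
      = (List.range N).map (fun a => if a ∈ ks.map key then u a (f a) else f a) := by
  intro ks
  induction ks with
  | nil => intro f _ _ _; simp
  | cons e t ih =>
    intro f hnd hb hstep
    have hk : key e < N := hb e List.mem_cons_self
    rw [List.map_cons] at hnd
    have hnd' := List.nodup_cons.mp hnd
    rw [List.foldl_cons, hstep f e List.mem_cons_self, pv_set_map_range N f (key e) hk,
        ih _ hnd'.2
          (fun q hq => hb q (List.mem_cons_of_mem _ hq))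
          (fun f q hq => hstep f q (List.mem_cons_of_mem _ hq))]
    apply List.map_congr_left
    intro a ha
    have hknot : key e ∉ t.map key := hnd'.1
    by_cases h1 : a ∈ t.map key
    · have hne : a ≠ key e := fun he => hknot (he ▸ h1)
      simp [h1, hne]
    · by_cases h2 : a = key e
      · subst h2
        simp [h1]
      · simp [h1, h2]

-- the matrix-building fold produces the pair-count matrix
theorem pv_matfold (N : Nat) {α : Type} (key : α → Int × Int) (gs : List α)
    (hb : ∀ g ∈ gs, (0 ≤ (key g).1 ∧ (key g).1.toNat < N) ∧ (0 ≤ (key g).2 ∧ (key g).2.toNat < N)) :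
    ∀ (f : Nat → Nat → Int),
    gs.foldl (fun m g => pvStepM m (key g))
      ((List.range N).map (fun a => (List.range N).map (fun b => f a b)))
      = (List.range N).map (fun a => (List.range N).map (fun b =>
          f a b + ((gs.map key).count ((a : Int), (b : Int)) : Int))) := by
  induction gs with
  | nil => intro f; simp
  | cons g t ih =>
    intro f
    have hp := hb g List.mem_cons_self
    have hstep :
        pvStepM ((List.range N).map (fun a => (List.range N).map (fun b => f a b))) (key g)
        = (List.range N).map (fun a => (List.range N).map (fun b =>
            if a = (key g).1.toNat ∧ b = (key g).2.toNat then f a b + 1 else f a b)) := by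
      rw [pvStepM, PySem.List.pySetD_of_nonneg _ _ hp.1.1, PySem.List.pySetD_of_nonneg _ _ hp.2.1,
          PySem.List.pyGetD_of_nonneg _ _ hp.1.1, PySem.List.pyGetD_of_nonneg _ _ hp.2.1]
      have hrow : (((List.range N).map (fun a => (List.range N).map (fun b => f a b))).getD (key g).1.toNat [])
          = (List.range N).map (fun b => f (key g).1.toNat b) :=
        PySem.List.getD_map_range _ N _ [] hp.1.2
      rw [hrow]
      have hcell : (((List.range N).map (fun b => f (key g).1.toNat b)).getD (key g).2.toNat 0)
          = f (key g).1.toNat (key g).2.toNat :=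
        PySem.List.getD_map_range _ N _ 0 hp.2.2
      rw [hcell, pv_set_map_range N _ (key g).2.toNat hp.2.2, pv_set_map_range N _ (key g).1.toNat hp.1.2]
      apply List.map_congr_left
      intro a _
      by_cases h1 : a = (key g).1.toNat
      · subst h1
        rw [if_pos rfl]
        apply List.map_congr_left
        intro b _
        by_cases h2 : b = (key g).2.toNat <;> simp [h2]
      · simp only [if_neg h1]
        apply List.map_congr_left
        intro b _
        simp [h1]
    rw [List.foldl_cons, hstep, ih (fun q hq => hb q (List.mem_cons_of_mem _ hq))]
    apply List.map_congr_left
    intro a _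
    apply List.map_congr_left
    intro b _
    rw [List.map_cons, List.count_cons]
    by_cases hc : a = (key g).1.toNat ∧ b = (key g).2.toNat
    · have e1 : (key g).1 = (a : Int) := by have := hp.1.1; omega
      have e2 : (key g).2 = (b : Int) := by have := hp.2.1; omega
      have hg' : key g = ((a : Int), (b : Int)) := Prod.ext e1 e2
      rw [if_pos hc, hg', beq_self_eq_true, if_pos rfl]
      push_cast
      ring
    · have hg' : ¬ key g = ((a : Int), (b : Int)) := by
        intro he
        exact hc ⟨by rw [he]; simp, by rw [he]; simp⟩
      rw [if_neg hc, beq_eq_false_iff_ne.mpr hg', if_neg Bool.false_ne_true]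
      push_cast
      ring

-- the pair-dictionary fold counts pairs
theorem pv_dictfold (friends : List String) : ∀ (gs : List String) (d : PySem.Dict (Int × Int) Int)
    (v : Int × Int),
    (gs.foldl (fun d g => d.insert (pvPk friends g) (d.getD (pvPk friends g) 0 + 1)) d).getD v 0
      = d.getD v 0 + ((gs.map (pvPk friends)).count v : Int) := by
  intro gs
  induction gs with
  | nil => intro d v; simp
  | cons g t ih =>
    intro d v
    rw [List.foldl_cons, ih, PySem.Dict.getD_insert, List.map_cons, List.count_cons]
    by_cases hv : v = pvPk friends g
    · rw [if_pos hv, hv, beq_self_eq_true, if_pos rfl]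
      push_cast
      ring
    · have : ¬ pvPk friends g = v := fun he => hv he.symm
      rw [if_neg hv, beq_eq_false_iff_ne.mpr this, if_neg Bool.false_ne_true]
      push_cast
      ring
-- row sum of the count matrix is the giver count
theorem pv_sum_count_fst (N : Nat) (qs : List (Int × Int))
    (hb : ∀ p ∈ qs, 0 ≤ p.2 ∧ p.2.toNat < N) (a : Int) :
    ((List.range N).map (fun (b : Nat) => (qs.count (a, (b : Int)) : Int))).sum
      = ((qs.map Prod.fst).count a : Int) := by
  induction qs with
  | nil => simp
  | cons p t ih =>
    have hp := hb p List.mem_cons_self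
    have ih' := ih (fun q hq => hb q (List.mem_cons_of_mem _ hq))
    have hmap : (List.range N).map (fun (b : Nat) => ((p :: t).count (a, (b : Int)) : Int))
        = (List.range N).map (fun (b : Nat) =>
            (t.count (a, (b : Int)) : Int) + (if p = (a, (b : Int)) then (1 : Int) else 0)) := by
      apply List.map_congr_left
      intro b _
      rw [List.count_cons]
      push_cast
      simp only [beq_iff_eq]
    rw [hmap, PySem.List.sum_map_add_int, ih', List.map_cons, List.count_cons]
    have hsingle : ((List.range N).map (fun (b : Nat) => if p = (a, (b : Int)) then (1 : Int) else 0)).sum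
        = if p.1 = a then 1 else 0 := by
      by_cases hpa : p.1 = a
      · have hrw : (List.range N).map (fun (b : Nat) => if p = (a, (b : Int)) then (1 : Int) else 0)
            = (List.range N).map (fun (b : Nat) => if (decide (b = p.2.toNat)) = true then (1 : Int) else 0) := by
          apply List.map_congr_left
          intro b _
          congr 1
          simp only [decide_eq_true_eq, eq_iff_iff]
          constructor
          · intro h; rw [h]; simp
          · intro h
            have e2 : p.2 = (b : Int) := by have := hp.1; omega
            exact Prod.ext hpa e2
        rw [hrw, PySem.List.sum_map_ite_one_zero]
        have hcp : (List.range N).countP (fun b => decide (b = p.2.toNat))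
            = (List.range N).count p.2.toNat := by
          simp only [List.count]
          apply List.countP_congr
          intro b _
          simp
        rw [hcp, List.count_range, if_pos hp.2, if_pos hpa]
        norm_num
      · have hrw : (List.range N).map (fun (b : Nat) => if p = (a, (b : Int)) then (1 : Int) else 0)
            = (List.range N).map (fun (_ : Nat) => (0 : Int)) := by
          apply List.map_congr_left
          intro b _
          rw [if_neg]
          intro h
          rw [h] at hpa
          simp at hpa
        rw [hrw, if_neg hpa]
        simp
    rw [hsingle]
    push_cast
    simp only [beq_iff_eq]

-- column sum of the count matrix is the taker count
theorem pv_sum_count_snd (N : Nat) (qs : List (Int × Int))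
    (hb : ∀ p ∈ qs, 0 ≤ p.1 ∧ p.1.toNat < N) (a : Int) :
    ((List.range N).map (fun (b : Nat) => (qs.count ((b : Int), a) : Int))).sum
      = ((qs.map Prod.snd).count a : Int) := by
  induction qs with
  | nil => simp
  | cons p t ih =>
    have hp := hb p List.mem_cons_self
    have ih' := ih (fun q hq => hb q (List.mem_cons_of_mem _ hq))
    have hmap : (List.range N).map (fun (b : Nat) => ((p :: t).count ((b : Int), a) : Int))
        = (List.range N).map (fun (b : Nat) =>
            (t.count ((b : Int), a) : Int) + (if p = ((b : Int), a) then (1 : Int) else 0)) := by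
      apply List.map_congr_left
      intro b _
      rw [List.count_cons]
      push_cast
      simp only [beq_iff_eq]
    rw [hmap, PySem.List.sum_map_add_int, ih', List.map_cons, List.count_cons]
    have hsingle : ((List.range N).map (fun (b : Nat) => if p = ((b : Int), a) then (1 : Int) else 0)).sum
        = if p.2 = a then 1 else 0 := by
      by_cases hpa : p.2 = a
      · have hrw : (List.range N).map (fun (b : Nat) => if p = ((b : Int), a) then (1 : Int) else 0)
            = (List.range N).map (fun (b : Nat) => if (decide (b = p.1.toNat)) = true then (1 : Int) else 0) := by
          apply List.map_congr_left
          intro b _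
          congr 1
          simp only [decide_eq_true_eq, eq_iff_iff]
          constructor
          · intro h; rw [h]; simp
          · intro h
            have e1 : p.1 = (b : Int) := by have := hp.1; omega
            exact Prod.ext e1 hpa
        rw [hrw, PySem.List.sum_map_ite_one_zero]
        have hcp : (List.range N).countP (fun b => decide (b = p.1.toNat))
            = (List.range N).count p.1.toNat := by
          simp only [List.count]
          apply List.countP_congr
          intro b _
          simp
        rw [hcp, List.count_range, if_pos hp.2, if_pos hpa]
        norm_num
      · have hrw : (List.range N).map (fun (b : Nat) => if p = ((b : Int), a) then (1 : Int) else 0)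
            = (List.range N).map (fun (_ : Nat) => (0 : Int)) := by
          apply List.map_congr_left
          intro b _
          rw [if_neg]
          intro h
          rw [h] at hpa
          simp at hpa
        rw [hrw, if_neg hpa]
        simp
    rw [hsingle]
    push_cast
    simp only [beq_iff_eq]


-- the inner take_result loop only ever increments slot i
theorem pv_inner (i : Nat) (cond : Int → Bool) (js : List Int) :
    ∀ (tr : List Int), i < tr.length →
    js.foldl (fun acc j => if cond j then acc.set i (acc.getD i 0 + 1) else acc) tr
      = tr.set i (tr.getD i 0 + (js.countP cond : Int)) := by
  induction js with
  | nil =>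
    intro tr hi
    rw [List.foldl_nil, List.countP_nil]
    push_cast
    rw [add_zero, List.getD_eq_getElem tr 0 hi, List.set_getElem_self]
  | cons j t ih =>
    intro tr hi
    rw [List.foldl_cons]
    by_cases hc : cond j = true
    · rw [if_pos hc, ih _ (by simpa using hi), List.set_set]
      have hgd : (tr.set i (tr.getD i 0 + 1)).getD i 0 = tr.getD i 0 + 1 := by
        rw [List.getD_eq_getElem _ 0 (by simpa using hi), List.getElem_set_self]
      rw [hgd, List.countP_cons_of_pos hc]
      congr 1
      push_cast
      ring
    · rw [if_neg hc, ih _ hi, List.countP_cons_of_neg (by simpa using hc)]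

-- matrix and gift-index lookups
theorem pv_entry (friends gifts : List String) (i j : Nat)
    (hi : i < friends.length) (hj : j < friends.length) :
    PySem.List.pyGetD (PySem.List.pyGetD (pvMat friends gifts) (i : Int) []) (j : Int) 0
      = pvC friends gifts i j := by
  rw [pvMat, PySem.List.pyGetD_natCast, PySem.List.pyGetD_natCast,
      PySem.List.getD_map_range _ _ _ _ hi, PySem.List.getD_map_range _ _ _ _ hj]

theorem pv_gil (friends gifts : List String) (i : Nat) (hi : i < friends.length) :
    PySem.List.pyGetD (pvGiL friends gifts) (i : Int) 0 = pvGidx friends gifts i := by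
  rw [pvGiL, PySem.List.pyGetD_natCast, PySem.List.getD_map_range _ _ _ _ hi]

theorem pv_pyRange_map_toNat (N : Nat) :
    (PySem.List.pyRange 0 (N : Int) 1).map Int.toNat = List.range N := by
  rw [PySem.List.pyRange_zero_natCast, List.map_map]
  have : ∀ k ∈ List.range N, (Int.toNat ∘ fun k : Nat => (k : Int)) k = id k := by
    intro k _
    simp
  rw [List.map_congr_left this, List.map_id]

-- A's matrix equals the count matrix
theorem pv_matrix_eq (friends gifts : List String) (h : friends ≠ []) :
    solutionGiftMatrix friends gifts = pvMat friends gifts := by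
  rw [show solutionGiftMatrix friends gifts
      = gifts.foldl (fun m g => pvStepM m (pvPk friends g))
          (List.replicate friends.length (List.replicate friends.length (0 : Int))) from rfl]
  have h0 : List.replicate friends.length (List.replicate friends.length (0 : Int))
      = (List.range friends.length).map (fun _ => (List.range friends.length).map (fun _ => (0 : Int))) := by
    rw [pv_repl_eq friends.length (0 : Int),
        pv_repl_eq friends.length ((List.range friends.length).map (fun _ => (0 : Int)))]
  rw [h0, pv_matfold friends.length (pvPk friends) gifts
        (fun g _ => pv_pk_bound friends h g) (fun _ _ => 0)]
  simp only [pvMat, pvC, zero_add]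

-- A's gift-index array equals its closed form
theorem pv_gil_eq (friends gifts : List String) (h : friends ≠ []) :
    solutionGiftIndex friends gifts = pvGiL friends gifts := by
  rw [show solutionGiftIndex friends gifts
      = (PySem.List.pyRange 0 (friends.length : Int) 1).foldl (fun gi idx =>
          PySem.List.pySetD gi idx
            ((PySem.List.pyGetD (solutionGiftMatrix friends gifts) idx []).sum -
             ((solutionGiftMatrix friends gifts).map (fun row => PySem.List.pyGetD row idx 0)).sum))
        (List.replicate friends.length 0) from rfl,
      pv_matrix_eq friends gifts h]
  have hsum : ∀ (i : Nat), i < friends.length →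
      (PySem.List.pyGetD (pvMat friends gifts) (i : Int) []).sum -
        ((pvMat friends gifts).map (fun row => PySem.List.pyGetD row (i : Int) 0)).sum
      = pvGidx friends gifts i := by
    intro i hi
    have hrow : (PySem.List.pyGetD (pvMat friends gifts) (i : Int) []).sum
        = (((gifts.map (pvPk friends)).map Prod.fst).count (i : Int) : Int) := by
      rw [pvMat, PySem.List.pyGetD_natCast, PySem.List.getD_map_range _ _ _ _ hi]
      exact pv_sum_count_fst friends.length (gifts.map (pvPk friends))
        (fun p hp => (pv_ps_bound friends gifts h p hp).2) (i : Int)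
    have hcol : ((pvMat friends gifts).map (fun row => PySem.List.pyGetD row (i : Int) 0)).sum
        = (((gifts.map (pvPk friends)).map Prod.snd).count (i : Int) : Int) := by
      rw [pvMat, List.map_map]
      have hc : ∀ a ∈ List.range friends.length,
          ((fun row => PySem.List.pyGetD row (i : Int) 0) ∘ fun a =>
            (List.range friends.length).map (fun b => pvC friends gifts a b)) a
          = (fun (b : Nat) => ((gifts.map (pvPk friends)).count ((b : Int), (i : Int)) : Int)) a := by
        intro a _
        simp only [Function.comp]
        rw [PySem.List.pyGetD_natCast, PySem.List.getD_map_range _ _ _ _ hi]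
        rfl
      rw [List.map_congr_left hc]
      exact pv_sum_count_snd friends.length (gifts.map (pvPk friends))
        (fun p hp => (pv_ps_bound friends gifts h p hp).1) (i : Int)
    rw [hrow, hcol, pvGidx]
  rw [pv_repl_eq friends.length (0 : Int),
      pv_fold_set_nodup friends.length Int.toNat _ (fun a _ => pvGidx friends gifts a) _ _
        (by rw [pv_pyRange_map_toNat]; exact List.nodup_range)
        (by
          intro e he
          have hb := PySem.List.mem_pyRange_one.mp he
          omega)
        (by
          intro f e he
          have hb := PySem.List.mem_pyRange_one.mp he
          have h0 : 0 ≤ e := hb.1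
          have hlt : e.toNat < friends.length := by omega
          have he' : e = ((e.toNat : Nat) : Int) := by omega
          rw [he', PySem.List.pySetD_natCast, hsum e.toNat hlt]
          simp only [Int.toNat_natCast])]
  rw [pv_pyRange_map_toNat, pvGiL]
  apply List.map_congr_left
  intro a ha
  rw [if_pos ha]

-- A's take_result array equals the score list
theorem pv_tr_eq (friends gifts : List String) (h : friends ≠ []) :
    solutionTakeResult friends gifts
      = (List.range friends.length).map (pvScore friends gifts) := by
  rw [show solutionTakeResult friends gifts
      = (PySem.List.pyRange 0 (friends.length : Int) 1).foldl (fun tr i =>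
      (PySem.List.pyRange 0 (friends.length : Int) 1).foldl (fun tr j =>
        if i = j then tr
        else
          if PySem.List.pyGetD (PySem.List.pyGetD (solutionGiftMatrix friends gifts) i []) j 0 >
               PySem.List.pyGetD (PySem.List.pyGetD (solutionGiftMatrix friends gifts) j []) i 0 ∨
             (PySem.List.pyGetD (PySem.List.pyGetD (solutionGiftMatrix friends gifts) i []) j 0 =
                PySem.List.pyGetD (PySem.List.pyGetD (solutionGiftMatrix friends gifts) j []) i 0 ∧
              PySem.List.pyGetD (solutionGiftIndex friends gifts) i 0 > PySem.List.pyGetD (solutionGiftIndex friends gifts) j 0)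
          then PySem.List.pySetD tr i (PySem.List.pyGetD tr i 0 + 1)
          else tr) tr)
        (List.replicate friends.length 0) from rfl,
      pv_matrix_eq friends gifts h, pv_gil_eq friends gifts h]
  rw [pv_repl_eq friends.length (0 : Int),
      pv_fold_set_nodup friends.length Int.toNat _
        (fun a old => old + pvScore friends gifts a) _ _
        (by rw [pv_pyRange_map_toNat]; exact List.nodup_range)
        (by
          intro e he
          have hb := PySem.List.mem_pyRange_one.mp he
          omega)
        (by
          intro f e he
          have hb := PySem.List.mem_pyRange_one.mp he
          have h0 : 0 ≤ e := hb.1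
          have hlt : e.toNat < friends.length := by omega
          have he' : e = ((e.toNat : Nat) : Int) := by omega
          -- rewrite the inner loop into pv_inner's shape
          have hcong : ∀ (acc : List Int), ∀ j ∈ PySem.List.pyRange 0 (friends.length : Int) 1,
              (if e = j then acc
               else
                 if PySem.List.pyGetD (PySem.List.pyGetD (pvMat friends gifts) e []) j 0 >
                      PySem.List.pyGetD (PySem.List.pyGetD (pvMat friends gifts) j []) e 0 ∨
                    (PySem.List.pyGetD (PySem.List.pyGetD (pvMat friends gifts) e []) j 0 =
                       PySem.List.pyGetD (PySem.List.pyGetD (pvMat friends gifts) j []) e 0 ∧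
                     PySem.List.pyGetD (pvGiL friends gifts) e 0 > PySem.List.pyGetD (pvGiL friends gifts) j 0)
                 then PySem.List.pySetD acc e (PySem.List.pyGetD acc e 0 + 1)
                 else acc)
              = (if pvWin friends gifts e.toNat j.toNat then
                   acc.set e.toNat (acc.getD e.toNat 0 + 1) else acc) := by
            intro acc j hj
            have hbj := PySem.List.mem_pyRange_one.mp hj
            have hj0 : 0 ≤ j := hbj.1
            have hjlt : j.toNat < friends.length := by omega
            have hj' : j = ((j.toNat : Nat) : Int) := by omega
            by_cases hij : e = j
            · have : e.toNat = j.toNat := by omega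
              rw [if_pos hij, pvWin]
              rw [if_neg (by simp [this])]
            · have hne : e.toNat ≠ j.toNat := by omega
              rw [if_neg hij]
              have hw : (PySem.List.pyGetD (PySem.List.pyGetD (pvMat friends gifts) e []) j 0 >
                      PySem.List.pyGetD (PySem.List.pyGetD (pvMat friends gifts) j []) e 0 ∨
                    (PySem.List.pyGetD (PySem.List.pyGetD (pvMat friends gifts) e []) j 0 =
                       PySem.List.pyGetD (PySem.List.pyGetD (pvMat friends gifts) j []) e 0 ∧
                     PySem.List.pyGetD (pvGiL friends gifts) e 0 > PySem.List.pyGetD (pvGiL friends gifts) j 0))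
                  ↔ (pvWin friends gifts e.toNat j.toNat = true) := by
                rw [pvWin, decide_eq_true_eq]
                rw [he', hj', pv_entry friends gifts _ _ hlt hjlt, pv_entry friends gifts _ _ hjlt hlt,
                    pv_gil friends gifts _ hlt, pv_gil friends gifts _ hjlt]
                constructor
                · intro hcond; exact ⟨hne, hcond⟩
                · intro hcond; exact hcond.2
              by_cases hcnd : pvWin friends gifts e.toNat j.toNat = true
              · rw [if_pos (hw.mpr hcnd), if_pos hcnd, he', PySem.List.pySetD_natCast,
                    PySem.List.pyGetD_natCast]
                simp only [Int.toNat_natCast]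
              · rw [if_neg (fun hcc => hcnd (hw.mp hcc)), if_neg hcnd]
          have hlen : e.toNat < ((List.range friends.length).map f).length := by
            simp [hlt]
          calc (PySem.List.pyRange 0 (friends.length : Int) 1).foldl (fun tr j =>
                if e = j then tr
                else
                  if PySem.List.pyGetD (PySem.List.pyGetD (pvMat friends gifts) e []) j 0 >
                       PySem.List.pyGetD (PySem.List.pyGetD (pvMat friends gifts) j []) e 0 ∨
                     (PySem.List.pyGetD (PySem.List.pyGetD (pvMat friends gifts) e []) j 0 =
                        PySem.List.pyGetD (PySem.List.pyGetD (pvMat friends gifts) j []) e 0 ∧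
                      PySem.List.pyGetD (pvGiL friends gifts) e 0 >
                        PySem.List.pyGetD (pvGiL friends gifts) j 0)
                  then PySem.List.pySetD tr e (PySem.List.pyGetD tr e 0 + 1)
                  else tr) ((List.range friends.length).map f)
              = (PySem.List.pyRange 0 (friends.length : Int) 1).foldl (fun acc j =>
                  if pvWin friends gifts e.toNat j.toNat then
                    acc.set e.toNat (acc.getD e.toNat 0 + 1) else acc)
                ((List.range friends.length).map f) :=
                PySem.List.foldl_congr_mem _ _ _ _ (fun acc x hx => hcong acc x hx)
            _ = ((List.range friends.length).map f).set e.toNat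
                  (((List.range friends.length).map f).getD e.toNat 0 +
                   (((PySem.List.pyRange 0 (friends.length : Int) 1).countP
                      (fun j => pvWin friends gifts e.toNat j.toNat)) : Int)) :=
                pv_inner e.toNat _ _ _ hlen
            _ = ((List.range friends.length).map f).set e.toNat
                  (f e.toNat + pvScore friends gifts e.toNat) := by
                rw [PySem.List.getD_map_range f _ _ 0 hlt]
                have hcp : (PySem.List.pyRange 0 (friends.length : Int) 1).countP
                    (fun j => pvWin friends gifts e.toNat j.toNat)
                    = (List.range friends.length).countP (pvWin friends gifts e.toNat) := by
                  rw [PySem.List.pyRange_zero_natCast, List.countP_map]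
                  apply List.countP_congr
                  intro k _
                  simp [Function.comp]
                rw [hcp, pvScore])]
  rw [pv_pyRange_map_toNat]
  apply List.map_congr_left
  intro a ha
  rw [if_pos ha, zero_add]


-- A computes the maximum of the score list
set_option maxHeartbeats 2000000 in
theorem pv_solution_eq (friends gifts : List String) (h : friends ≠ []) :
    solution friends gifts
      = (PySem.List.max? ((List.range friends.length).map (pvScore friends gifts)) (fun x => x)).getD 0 := by
  rw [solution, pv_tr_eq friends gifts h]

-- ===== B-side lemmas =====

-- normalized (sorted) pair, the partner-of-i selector, and the exchanged predicate
def pvNorm (p : Int × Int) : Int × Int := if p.1 < p.2 then p else (p.2, p.1)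

def pvSel (i : Int) (q : Int × Int) : Option Int :=
  if q.1 = i then some q.2 else if q.2 = i then some q.1 else none

def pvExch (friends gifts : List String) (i j : Nat) : Bool :=
  decide (j ≠ i ∧ (((i : Int), (j : Int)) ∈ gifts.map (pvPk friends) ∨
                   ((j : Int), (i : Int)) ∈ gifts.map (pvPk friends)))

-- the distinct normalized non-diagonal pairs of ks not yet in s, in processing order
def pvNewPairs : List (Int × Int) → PySem.Set (Int × Int) → List (Int × Int)
  | [], _ => []
  | p :: ks, s =>
    if p.1 ≠ p.2 then
      if pvNorm p ∈ s then pvNewPairs ks s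
      else pvNorm p :: pvNewPairs ks (PySem.Set.add s (pvNorm p))
    else pvNewPairs ks s

theorem pv_mem_newPairs : ∀ (ks : List (Int × Int)) (s : PySem.Set (Int × Int)) (q : Int × Int),
    q ∈ pvNewPairs ks s ↔ q ∉ s ∧ ∃ p ∈ ks, p.1 ≠ p.2 ∧ pvNorm p = q := by
  intro ks
  induction ks with
  | nil => intro s q; simp [pvNewPairs]
  | cons p t ih =>
    intro s q
    rw [pvNewPairs]
    by_cases hd : p.1 ≠ p.2
    · rw [if_pos hd]
      by_cases hs : pvNorm p ∈ s
      · rw [if_pos hs, ih]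
        constructor
        · rintro ⟨hq, p', hp', hd', hn⟩
          exact ⟨hq, p', List.mem_cons_of_mem _ hp', hd', hn⟩
        · rintro ⟨hq, p', hp', hd', hn⟩
          rcases List.mem_cons.mp hp' with h | h
          · exact absurd hs (by rw [h] at hn; rw [hn]; exact hq)
          · exact ⟨hq, p', h, hd', hn⟩
      · rw [if_neg hs, List.mem_cons, ih]
        constructor
        · rintro (rfl | ⟨hq, p', hp', hd', hn⟩)
          · exact ⟨hs, p, List.mem_cons_self, hd, rfl⟩
          · refine ⟨fun hmem => hq ((PySem.Set.mem_add _ _ _).mpr (Or.inl hmem)), p',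
              List.mem_cons_of_mem _ hp', hd', hn⟩
        · rintro ⟨hq, p', hp', hd', hn⟩
          by_cases he : q = pvNorm p
          · exact Or.inl he
          · rcases List.mem_cons.mp hp' with h | h
            · exact absurd (by rw [h] at hn; exact hn.symm) he
            · refine Or.inr ⟨?_, p', h, hd', hn⟩
              intro hmem
              rcases (PySem.Set.mem_add _ _ _).mp hmem with h' | h'
              · exact hq h'
              · exact he h'
    · rw [if_neg hd, ih]
      rw [not_not] at hd
      constructor
      · rintro ⟨hq, p', hp', hd', hn⟩
        exact ⟨hq, p', List.mem_cons_of_mem _ hp', hd', hn⟩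
      · rintro ⟨hq, p', hp', hd', hn⟩
        rcases List.mem_cons.mp hp' with h | h
        · exact absurd hd (by rw [h] at hd'; exact hd')
        · exact ⟨hq, p', h, hd', hn⟩

theorem pv_newPairs_nodup : ∀ (ks : List (Int × Int)) (s : PySem.Set (Int × Int)),
    (pvNewPairs ks s).Nodup := by
  intro ks
  induction ks with
  | nil => intro s; simp [pvNewPairs]
  | cons p t ih =>
    intro s
    rw [pvNewPairs]
    by_cases hd : p.1 ≠ p.2
    · rw [if_pos hd]
      by_cases hs : pvNorm p ∈ s
      · rw [if_pos hs]; exact ih s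
      · rw [if_neg hs]
        refine List.nodup_cons.mpr ⟨?_, ih _⟩
        intro hmem
        have := (pv_mem_newPairs _ _ _).mp hmem
        exact this.1 ((PySem.Set.mem_add _ _ _).mpr (Or.inr rfl))
    · rw [if_neg hd]; exact ih s

theorem pv_newPairs_lt (ks : List (Int × Int)) (s : PySem.Set (Int × Int)) (q : Int × Int)
    (h : q ∈ pvNewPairs ks s) : q.1 < q.2 := by
  obtain ⟨-, p, -, hd, hn⟩ := (pv_mem_newPairs ks s q).mp h
  rw [pvNorm] at hn
  by_cases hlt : p.1 < p.2
  · rw [if_pos hlt] at hn; rw [← hn]; exact hlt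
  · rw [if_neg hlt] at hn; rw [← hn]; simp only []; omega

theorem pv_sel_some (i j : Int) (q : Int × Int) (hq : q.1 < q.2) :
    pvSel i q = some j ↔ (i ≠ j ∧ q = pvNorm (i, j)) := by
  rcases q with ⟨x, y⟩
  simp only at hq
  rw [pvSel, pvNorm]
  constructor
  · intro h
    split_ifs at h with h1 h2
    · have hj := Option.some.inj h
      simp only at h1 hj
      subst hj
      subst h1
      refine ⟨by omega, ?_⟩
      rw [if_pos hq]
    · have hj := Option.some.inj h
      simp only at h1 h2 hj
      subst hj
      subst h2
      refine ⟨by omega, ?_⟩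
      rw [if_neg (by omega)]
  · rintro ⟨hij, hn⟩
    by_cases hlt : i < j
    · rw [if_pos hlt, Prod.mk.injEq] at hn
      simp only at hn ⊢
      rw [if_pos hn.1, hn.2]
    · rw [if_neg hlt, Prod.mk.injEq] at hn
      simp only at hn ⊢
      rw [if_neg (by omega), if_pos hn.2, hn.1]

theorem pv_norm_eq_iff (p : Int × Int) (hp : p.1 ≠ p.2) (i j : Int) :
    pvNorm p = pvNorm (i, j) ↔ p = (i, j) ∨ p = (j, i) := by
  rcases p with ⟨x, y⟩
  simp only at hp
  rw [pvNorm, pvNorm]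
  split_ifs with h1 h2 h2 <;> simp only [Prod.mk.injEq] at * <;> omega

theorem pv_nodup_filterMap_sel (i : Int) :
    ∀ (l : List (Int × Int)), l.Nodup → (∀ q ∈ l, q.1 < q.2) →
    (l.filterMap (pvSel i)).Nodup := by
  intro l
  induction l with
  | nil => intro _ _; simp
  | cons q t ih =>
    intro hnd hlt
    have hnd' := List.nodup_cons.mp hnd
    rw [List.filterMap_cons]
    cases hsel : pvSel i q with
    | none => exact ih hnd'.2 (fun q' hq' => hlt q' (List.mem_cons_of_mem _ hq'))
    | some j =>
      refine List.nodup_cons.mpr ⟨?_, ih hnd'.2 (fun q' hq' => hlt q' (List.mem_cons_of_mem _ hq'))⟩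
      intro hmem
      obtain ⟨q', hq', hsel'⟩ := List.mem_filterMap.mp hmem
      have e1 := (pv_sel_some i j q (hlt q List.mem_cons_self)).mp hsel
      have e2 := (pv_sel_some i j q' (hlt q' (List.mem_cons_of_mem _ hq'))).mp hsel'
      exact hnd'.1 (by rw [e1.2, ← e2.2]; exact hq')

-- the gidx-building fold (two pointwise updates per gift)
theorem pv_gidx2fold (N : Nat) {α : Type} (key : α → Int × Int) (gs : List α)
    (hb : ∀ g ∈ gs, (0 ≤ (key g).1 ∧ (key g).1.toNat < N) ∧ (0 ≤ (key g).2 ∧ (key g).2.toNat < N)) :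
    ∀ (f : Nat → Int),
    gs.foldl (fun arr g =>
        PySem.List.pySetD
          (PySem.List.pySetD arr (key g).1 (PySem.List.pyGetD arr (key g).1 0 + 1))
          (key g).2
          (PySem.List.pyGetD
            (PySem.List.pySetD arr (key g).1 (PySem.List.pyGetD arr (key g).1 0 + 1))
            (key g).2 0 - 1))
      ((List.range N).map f)
      = (List.range N).map (fun a =>
          f a + (((gs.map key).map Prod.fst).count (a : Int) : Int)
              - (((gs.map key).map Prod.snd).count (a : Int) : Int)) := by
  induction gs with
  | nil => intro f; simp
  | cons g t ih =>
    intro f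
    have hp := hb g List.mem_cons_self
    have hstep :
        PySem.List.pySetD
          (PySem.List.pySetD ((List.range N).map f) (key g).1
            (PySem.List.pyGetD ((List.range N).map f) (key g).1 0 + 1))
          (key g).2
          (PySem.List.pyGetD
            (PySem.List.pySetD ((List.range N).map f) (key g).1
              (PySem.List.pyGetD ((List.range N).map f) (key g).1 0 + 1))
            (key g).2 0 - 1)
        = (List.range N).map (fun a =>
            f a + (if a = (key g).1.toNat then 1 else 0)
                - (if a = (key g).2.toNat then 1 else 0)) := by
      rw [PySem.List.pySetD_of_nonneg _ _ hp.1.1, PySem.List.pyGetD_of_nonneg _ _ hp.1.1,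
          PySem.List.getD_map_range f N _ 0 hp.1.2, pv_set_map_range N f (key g).1.toNat hp.1.2,
          PySem.List.pySetD_of_nonneg _ _ hp.2.1, PySem.List.pyGetD_of_nonneg _ _ hp.2.1,
          PySem.List.getD_map_range _ N _ 0 hp.2.2, pv_set_map_range N _ (key g).2.toNat hp.2.2]
      apply List.map_congr_left
      intro a _
      by_cases h1 : a = (key g).1.toNat <;> by_cases h2 : a = (key g).2.toNat
      · subst h1
        split_ifs <;> omega
      · subst h1
        split_ifs <;> omega
      · subst h2
        split_ifs <;> omega
      · split_ifs
        omega
    rw [List.foldl_cons, hstep, ih (fun q hq => hb q (List.mem_cons_of_mem _ hq))]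
    apply List.map_congr_left
    intro a _
    simp only [List.map_cons, List.count_cons, beq_iff_eq]
    by_cases h1 : a = (key g).1.toNat <;> by_cases h2 : a = (key g).2.toNat
    · rw [if_pos h1, if_pos h2, if_pos (show (key g).1 = ((a : Int)) by have := hp.1.1; omega),
          if_pos (show (key g).2 = ((a : Int)) by have := hp.2.1; omega)]
      push_cast; ring
    · rw [if_pos h1, if_neg h2, if_pos (show (key g).1 = ((a : Int)) by have := hp.1.1; omega),
          if_neg (show ¬ (key g).2 = ((a : Int)) by have := hp.2.1; omega)]
      push_cast; ring
    · rw [if_neg h1, if_pos h2, if_neg (show ¬ (key g).1 = ((a : Int)) by have := hp.1.1; omega),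
          if_pos (show (key g).2 = ((a : Int)) by have := hp.2.1; omega)]
      push_cast; ring
    · rw [if_neg h1, if_neg h2, if_neg (show ¬ (key g).1 = ((a : Int)) by have := hp.1.1; omega),
          if_neg (show ¬ (key g).2 = ((a : Int)) by have := hp.2.1; omega)]
      push_cast; ring
-- the nbrs fold produces, at each index a, the partners selected from the new pairs
theorem pv_nbrsfold (N : Nat) :
    ∀ (ks : List (Int × Int)) (s : PySem.Set (Int × Int)) (f : Nat → List Int),
    (∀ p ∈ ks, (0 ≤ p.1 ∧ p.1.toNat < N) ∧ (0 ≤ p.2 ∧ p.2.toNat < N)) →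
    ks.foldl
      (fun st p =>
        if p.1 ≠ p.2 then
          if (if p.1 < p.2 then (p.1, p.2) else (p.2, p.1)) ∈ st.1 then st
          else
            (PySem.Set.add st.1 (if p.1 < p.2 then (p.1, p.2) else (p.2, p.1)),
             PySem.List.pySetD
               (PySem.List.pySetD st.2 p.1 ((PySem.List.pyGetD st.2 p.1 []) ++ [p.2]))
               p.2
               ((PySem.List.pyGetD
                  (PySem.List.pySetD st.2 p.1 ((PySem.List.pyGetD st.2 p.1 []) ++ [p.2]))
                  p.2 []) ++ [p.1]))
        else st)
      (s, (List.range N).map f)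
      = ((pvNewPairs ks s).foldl PySem.Set.add s,
         (List.range N).map (fun a => f a ++ (pvNewPairs ks s).filterMap (pvSel (a : Int)))) := by
  intro ks
  induction ks with
  | nil => intro s f _; simp [pvNewPairs]
  | cons p t ih =>
    intro s f hb
    have hp := hb p List.mem_cons_self
    have hnorm : (if p.1 < p.2 then (p.1, p.2) else (p.2, p.1)) = pvNorm p := by
      rw [pvNorm]
    by_cases hd : p.1 ≠ p.2
    · by_cases hs : pvNorm p ∈ s
      · have hNP : pvNewPairs (p :: t) s = pvNewPairs t s := by
          rw [pvNewPairs, if_pos hd, if_pos hs]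
        rw [hNP, List.foldl_cons, if_pos hd, hnorm, if_pos hs,
            ih s f (fun q hq => hb q (List.mem_cons_of_mem _ hq))]
      · have hNP : pvNewPairs (p :: t) s = pvNorm p :: pvNewPairs t (PySem.Set.add s (pvNorm p)) := by
          rw [pvNewPairs, if_pos hd, if_neg hs]
        have hne : p.1.toNat ≠ p.2.toNat := by
          have := hp.1.1; have := hp.2.1; omega
        have hstep :
            PySem.List.pySetD
               (PySem.List.pySetD ((List.range N).map f) p.1 ((PySem.List.pyGetD ((List.range N).map f) p.1 []) ++ [p.2]))
               p.2
               ((PySem.List.pyGetD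
                  (PySem.List.pySetD ((List.range N).map f) p.1 ((PySem.List.pyGetD ((List.range N).map f) p.1 []) ++ [p.2]))
                  p.2 []) ++ [p.1])
            = (List.range N).map (fun a => f a ++ (pvSel (a : Int) (pvNorm p)).toList) := by
          rw [PySem.List.pySetD_of_nonneg _ _ hp.1.1, PySem.List.pyGetD_of_nonneg _ _ hp.1.1,
              PySem.List.getD_map_range f N _ [] hp.1.2, pv_set_map_range N f p.1.toNat hp.1.2,
              PySem.List.pySetD_of_nonneg _ _ hp.2.1, PySem.List.pyGetD_of_nonneg _ _ hp.2.1,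
              PySem.List.getD_map_range _ N _ [] hp.2.2, pv_set_map_range N _ p.2.toNat hp.2.2]
          apply List.map_congr_left
          intro a _
          have hsel : pvSel (a : Int) (pvNorm p)
              = (if (a : Int) = p.1 then some p.2 else if (a : Int) = p.2 then some p.1 else none) := by
            rw [pvSel, pvNorm]
            by_cases hlt : p.1 < p.2
            · rw [if_pos hlt]
              by_cases h1 : (a : Int) = p.1
              · rw [if_pos h1.symm, if_pos h1]
              · rw [if_neg (fun h => h1 h.symm), if_neg h1]
                by_cases h2 : (a : Int) = p.2
                · rw [if_pos h2.symm, if_pos h2]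
                · rw [if_neg (fun h => h2 h.symm), if_neg h2]
            · rw [if_neg hlt]
              by_cases h2 : (a : Int) = p.2
              · rw [if_pos h2.symm, if_pos h2, if_neg (by intro h; exact hd (by omega))]
              · rw [if_neg (fun h => h2 h.symm), if_neg h2]
                by_cases h1 : (a : Int) = p.1
                · rw [if_pos h1.symm, if_pos h1]
                · rw [if_neg (fun h => h1 h.symm), if_neg h1]
          rw [hsel]
          by_cases h1 : a = p.1.toNat
          · have e1 : (a : Int) = p.1 := by have := hp.1.1; omega
            have h2 : ¬ a = p.2.toNat := by omega
            rw [if_neg h2, if_pos h1, if_pos e1, ← h1]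
            rfl
          · have e1 : ¬ (a : Int) = p.1 := by have := hp.1.1; omega
            rw [if_neg e1]
            by_cases h2 : a = p.2.toNat
            · have e2 : (a : Int) = p.2 := by have := hp.2.1; omega
              rw [if_pos h2, if_neg (fun h => hne h.symm), if_pos e2, ← h2]
              rfl
            · have e2 : ¬ (a : Int) = p.2 := by have := hp.2.1; omega
              rw [if_neg h2, if_neg h1, if_neg e2]
              simp
        rw [hNP, List.foldl_cons, if_pos hd, hnorm, if_neg hs, hstep,
            ih (PySem.Set.add s (pvNorm p)) _ (fun q hq => hb q (List.mem_cons_of_mem _ hq)),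
            List.foldl_cons]
        refine congrArg _ ?_
        apply List.map_congr_left
        intro a _
        rw [List.filterMap_cons]
        cases hsel : pvSel (a : Int) (pvNorm p) with
        | none => simp
        | some j => simp
    · have hNP : pvNewPairs (p :: t) s = pvNewPairs t s := by
        rw [pvNewPairs, if_neg hd]
      rw [hNP, List.foldl_cons, if_neg hd,
          ih s f (fun q hq => hb q (List.mem_cons_of_mem _ hq))]

-- last-one-wins lookup of a right fold of inserts
theorem pv_getD_foldr_insert (key val : Int → Int) :
    ∀ (l : List Int) (d : PySem.Dict Int Int) (v : Int),
    (l.foldr (fun k d => d.insert (key k) (val k)) d).getD v 0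
      = match l.find? (fun k => key k == v) with
        | some k => val k
        | none => d.getD v 0 := by
  intro l
  induction l with
  | nil => intro d v; simp
  | cons k t ih =>
    intro d v
    rw [List.foldr_cons, PySem.Dict.getD_insert, List.find?_cons]
    by_cases h : key k = v
    · rw [if_pos h.symm]
      simp [h]
    · rw [if_neg (fun hh => h hh.symm), beq_eq_false_iff_ne.mpr h, ih]

-- first index carrying v is idxOf
theorem pv_find_idxOf : ∀ (xs : List Int) (v : Int), v ∈ xs →
    (List.range xs.length).find? (fun k => xs.getD k 0 == v) = some (xs.idxOf v) := by
  intro xs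
  induction xs with
  | nil => intro v hv; simp at hv
  | cons x t ih =>
    intro v hv
    rw [List.length_cons, List.range_succ_eq_map]
    by_cases h : x = v
    · rw [List.find?_cons_of_pos (by simp [h]), h, List.idxOf_cons_self]
    · have hv' : v ∈ t := by
        rcases List.mem_cons.mp hv with hh | hh
        · exact absurd hh.symm h
        · exact hh
      rw [List.find?_cons_of_neg (by simp [h]), List.find?_map]
      have hcomp : ((fun k => (x :: t).getD k 0 == v) ∘ Nat.succ)
          = (fun k => t.getD k 0 == v) := by
        funext k
        simp [Function.comp]
      rw [hcomp, ih v hv']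
      simp only [Option.map_some]
      congr 1
      rw [List.idxOf_cons]
      simp [beq_eq_false_iff_ne.mpr (fun hh => h hh)]

-- in a sorted list, idxOf v counts the elements below v
theorem pv_idxOf_sorted : ∀ (xs : List Int), xs.Pairwise (· ≤ ·) → ∀ v, v ∈ xs →
    xs.idxOf v = xs.countP (fun x => decide (x < v)) := by
  intro xs
  induction xs with
  | nil => intro _ v hv; simp at hv
  | cons x t ih =>
    intro hp v hv
    have hp' := List.pairwise_cons.mp hp
    by_cases h : x = v
    · rw [h, List.idxOf_cons_self, List.countP_cons,
          List.countP_eq_zero.mpr (by intro y hy; simpa using by have := hp'.1 y hy; omega)]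
      simp
    · have hv' : v ∈ t := by
        rcases List.mem_cons.mp hv with hh | hh
        · exact absurd hh.symm h
        · exact hh
      have hxv : x < v := by
        have := hp'.1 v hv'
        omega
      rw [List.idxOf_cons, beq_eq_false_iff_ne.mpr h, List.countP_cons, if_pos (by simpa using hxv),
          ih hp'.2 v hv']
      simp

-- a sum over a filter is a sum of guarded terms over the whole list
theorem pv_sum_filter_eq (p : Nat → Bool) (h : Nat → Int) (l : List Nat) :
    ((l.filter p).map h).sum = (l.map (fun j => if p j then h j else 0)).sum := by
  induction l with
  | nil => simp
  | cons x t ih =>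
    by_cases hx : p x = true
    · rw [List.filter_cons_of_pos hx, List.map_cons, List.map_cons, List.sum_cons, List.sum_cons,
          if_pos hx, ih]
    · rw [List.filter_cons_of_neg (by simpa using hx), List.map_cons, List.sum_cons,
          if_neg (by simpa using hx), ih]
      omega

-- value-level names for B's parse-pass results and pair list
def pvDictB (friends gifts : List String) : PySem.Dict (Int × Int) Int :=
  gifts.foldl (fun d g => d.insert (pvPk friends g) (d.getD (pvPk friends g) 0 + 1)) PySem.Dict.empty

def pvNP (friends gifts : List String) : List (Int × Int) :=
  pvNewPairs (PySem.Set.ofList (gifts.map (pvPk friends))) PySem.Set.empty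

-- B's parse pass: the pair dict and the gift-index list
theorem pv_cntstate (friends gifts : List String) (h : friends ≠ []) :
    solutionAltCnt friends gifts = (pvDictB friends gifts, pvGiL friends gifts) := by
  rw [show solutionAltCnt friends gifts
      = gifts.foldl (fun st g =>
          (st.1.insert (pvPk friends g) (st.1.getD (pvPk friends g) 0 + 1),
           PySem.List.pySetD
             (PySem.List.pySetD st.2 (pvPk friends g).1 (PySem.List.pyGetD st.2 (pvPk friends g).1 0 + 1))
             (pvPk friends g).2
             (PySem.List.pyGetD
               (PySem.List.pySetD st.2 (pvPk friends g).1 (PySem.List.pyGetD st.2 (pvPk friends g).1 0 + 1))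
               (pvPk friends g).2 0 - 1)))
        (PySem.Dict.empty, List.replicate friends.length 0) from rfl,
      PySem.List.foldl_prod_mk
        (f := fun (d : PySem.Dict (Int × Int) Int) (g : String) =>
          d.insert (pvPk friends g) (d.getD (pvPk friends g) 0 + 1))
        (g := fun (arr : List Int) (g : String) =>
          PySem.List.pySetD
            (PySem.List.pySetD arr (pvPk friends g).1 (PySem.List.pyGetD arr (pvPk friends g).1 0 + 1))
            (pvPk friends g).2
            (PySem.List.pyGetD
              (PySem.List.pySetD arr (pvPk friends g).1 (PySem.List.pyGetD arr (pvPk friends g).1 0 + 1))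
              (pvPk friends g).2 0 - 1))]
  refine congrArg _ ?_
  rw [pv_repl_eq friends.length (0 : Int),
      pv_gidx2fold friends.length (pvPk friends) gifts (fun g _ => pv_pk_bound friends h g) (fun _ => 0)]
  apply List.map_congr_left
  intro a _
  rw [pvGidx, zero_add]

theorem pv_cnt_getD (friends gifts : List String) (v : Int × Int) :
    (pvDictB friends gifts).getD v 0 = ((gifts.map (pvPk friends)).count v : Int) := by
  rw [pvDictB, pv_dictfold, PySem.Dict.getD_empty, zero_add]

theorem pv_keysB (friends gifts : List String) :
    (pvDictB friends gifts).keys = PySem.Set.ofList (gifts.map (pvPk friends)) := by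
  rw [pvDictB, PySem.Dict.keys_foldl_insert_key]
  rw [show (PySem.Dict.empty : PySem.Dict (Int × Int) Int).keys = [] from rfl]
  rw [PySem.Set.update_nil_left]

-- B's nbrs pass: each slot holds the partners filtered out of the new-pair list
theorem pv_nbrs_eq (friends gifts : List String) (h : friends ≠ []) :
    (solutionAltNbrs friends gifts).2
      = (List.range friends.length).map (fun (a : Nat) => (pvNP friends gifts).filterMap (pvSel (a : Int))) := by
  have hb : ∀ p ∈ PySem.Set.ofList (gifts.map (pvPk friends)),
      (0 ≤ p.1 ∧ p.1.toNat < friends.length) ∧ (0 ≤ p.2 ∧ p.2.toNat < friends.length) := by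
    intro p hp
    exact pv_ps_bound friends gifts h p ((PySem.Set.mem_ofList _ _).mp hp)
  have hmain := pv_nbrsfold friends.length (PySem.Set.ofList (gifts.map (pvPk friends)))
      PySem.Set.empty (fun _ => ([] : List Int)) hb
  have hstart : (solutionAltNbrs friends gifts)
      = ((pvNP friends gifts).foldl PySem.Set.add PySem.Set.empty,
         (List.range friends.length).map
           (fun (a : Nat) => ([] : List Int) ++ (pvNP friends gifts).filterMap (pvSel (a : Int)))) := by
    rw [show solutionAltNbrs friends gifts
        = ((solutionAltCnt friends gifts).1.keys).foldl
            (fun st (p : Int × Int) =>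
              if p.1 ≠ p.2 then
                if (if p.1 < p.2 then (p.1, p.2) else (p.2, p.1)) ∈ st.1 then st
                else
                  (PySem.Set.add st.1 (if p.1 < p.2 then (p.1, p.2) else (p.2, p.1)),
                   PySem.List.pySetD
                     (PySem.List.pySetD st.2 p.1 ((PySem.List.pyGetD st.2 p.1 []) ++ [p.2]))
                     p.2
                     ((PySem.List.pyGetD
                        (PySem.List.pySetD st.2 p.1 ((PySem.List.pyGetD st.2 p.1 []) ++ [p.2]))
                        p.2 []) ++ [p.1]))
              else st)
            (PySem.Set.empty, List.replicate friends.length []) from rfl,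
        pv_cntstate friends gifts h]
    rw [show (pvDictB friends gifts, pvGiL friends gifts).1 = pvDictB friends gifts from rfl,
        pv_keysB friends gifts, pv_repl_eq friends.length ([] : List Int)]
    simp only [pvNP]
    exact hmain
  rw [show (solutionAltNbrs friends gifts).2
      = ((pvNP friends gifts).foldl PySem.Set.add PySem.Set.empty,
         (List.range friends.length).map
           (fun (a : Nat) => ([] : List Int) ++ (pvNP friends gifts).filterMap (pvSel (a : Int)))).2 from
      congrArg Prod.snd hstart]
  apply List.map_congr_left
  intro a _
  rw [List.nil_append]

theorem pv_norm_lt (x y : Int) (h : x ≠ y) : (pvNorm (x, y)).1 < (pvNorm (x, y)).2 := by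
  rw [pvNorm]
  by_cases hlt : x < y
  · rw [if_pos (by exact hlt)]
    exact hlt
  · rw [if_neg (by exact hlt)]
    simp only
    omega

-- the rank lookup: first[gidx[i]] counts the friends with strictly smaller gift index
theorem pv_first_eq (friends gifts : List String) (h : friends ≠ []) (i : Nat)
    (hi : i < friends.length) :
    (solutionAltFirst friends gifts).getD (pvGidx friends gifts i) 0
      = ((List.range friends.length).countP
          (fun j => decide (pvGidx friends gifts j < pvGidx friends gifts i)) : Int) := by
  have hsf : solutionAltFirst friends gifts
      = (PySem.List.pyRange ((friends.length : Int) - 1) (-1) (-1)).foldl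
          (fun d k => d.insert
            (PySem.List.pyGetD (PySem.List.sorted (pvGiL friends gifts) (fun x => x) false) k 0) k)
          PySem.Dict.empty := by
    rw [show solutionAltFirst friends gifts
        = (PySem.List.pyRange ((friends.length : Int) - 1) (-1) (-1)).foldl
            (fun d k => d.insert
              (PySem.List.pyGetD
                (PySem.List.sorted (solutionAltCnt friends gifts).2 (fun x => x) false) k 0) k)
            PySem.Dict.empty from rfl,
        pv_cntstate friends gifts h]
  have hrange : PySem.List.pyRange ((friends.length : Int) - 1) (-1) (-1)
      = (PySem.List.pyRange 0 (friends.length : Int) 1).reverse := by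
    rw [PySem.List.pyRange_neg_one_eq_reverse]
    norm_num
  rw [hsf, hrange, List.foldl_reverse]
  have hfoldr := pv_getD_foldr_insert
    (fun k => PySem.List.pyGetD (PySem.List.sorted (pvGiL friends gifts) (fun x => x) false) k 0)
    (fun k => k)
    (PySem.List.pyRange 0 (friends.length : Int) 1) PySem.Dict.empty (pvGidx friends gifts i)
  rw [hfoldr]
  have hlenv : (PySem.List.sorted (pvGiL friends gifts) (fun x => x) false).length = friends.length := by
    rw [PySem.List.length_sorted, pvGiL, List.length_map, List.length_range]
  have hv : pvGidx friends gifts i ∈ PySem.List.sorted (pvGiL friends gifts) (fun x => x) false := by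
    rw [PySem.List.mem_sorted]
    exact List.mem_map.mpr ⟨i, List.mem_range.mpr hi, rfl⟩
  have hfind : (PySem.List.pyRange 0 (friends.length : Int) 1).find?
      (fun k => PySem.List.pyGetD (PySem.List.sorted (pvGiL friends gifts) (fun x => x) false) k 0
        == pvGidx friends gifts i)
      = some (((PySem.List.sorted (pvGiL friends gifts) (fun x => x) false).idxOf
          (pvGidx friends gifts i) : Nat) : Int) := by
    rw [PySem.List.pyRange_zero_natCast, List.find?_map]
    have hcomp : ((fun k => PySem.List.pyGetD (PySem.List.sorted (pvGiL friends gifts) (fun x => x) false) k 0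
          == pvGidx friends gifts i) ∘ (fun (k : Nat) => (k : Int)))
        = (fun (k : Nat) =>
            (PySem.List.sorted (pvGiL friends gifts) (fun x => x) false).getD k 0
              == pvGidx friends gifts i) := by
      funext k
      simp [Function.comp]
    rw [hcomp, ← hlenv, pv_find_idxOf _ _ hv, Option.map_some]
  rw [hfind]
  have hidx := pv_idxOf_sorted (PySem.List.sorted (pvGiL friends gifts) (fun x => x) false)
    (PySem.List.sorted_pairwise (pvGiL friends gifts) (fun x => x)) (pvGidx friends gifts i) hv
  rw [hidx]
  have hcp : (PySem.List.sorted (pvGiL friends gifts) (fun x => x) false).countP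
        (fun x => decide (x < pvGidx friends gifts i))
      = (pvGiL friends gifts).countP (fun x => decide (x < pvGidx friends gifts i)) :=
    List.Perm.countP_congr (PySem.List.sorted_perm (pvGiL friends gifts) (fun x => x) false)
      (fun x => congrFun rfl)
  rw [hcp, pvGiL, List.countP_map]
  rfl

-- membership in B's partner list for i
theorem pv_memL (friends gifts : List String) (i : Nat) (x : Int) :
    x ∈ (pvNP friends gifts).filterMap (pvSel (i : Int))
      ↔ ((i : Int) ≠ x ∧ (((i : Int), x) ∈ gifts.map (pvPk friends)
                        ∨ (x, (i : Int)) ∈ gifts.map (pvPk friends))) := by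
  rw [List.mem_filterMap]
  constructor
  · rintro ⟨q, hqNP, hsel⟩
    have hlt := pv_newPairs_lt _ _ q hqNP
    obtain ⟨-, p, hpK, hpd, hpn⟩ := (pv_mem_newPairs _ _ q).mp hqNP
    have hpK' : p ∈ gifts.map (pvPk friends) := (PySem.Set.mem_ofList _ _).mp hpK
    obtain ⟨hne, hqn⟩ := (pv_sel_some (i : Int) x q hlt).mp hsel
    have hnn : pvNorm p = pvNorm ((i : Int), x) := by rw [hpn, hqn]
    rcases (pv_norm_eq_iff p hpd (i : Int) x).mp hnn with hp | hp
    · exact ⟨hne, Or.inl (hp ▸ hpK')⟩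
    · exact ⟨hne, Or.inr (hp ▸ hpK')⟩
  · rintro ⟨hne, hm⟩
    refine ⟨pvNorm ((i : Int), x), ?_, (pv_sel_some (i : Int) x _ (pv_norm_lt _ _ hne)).mpr ⟨hne, rfl⟩⟩
    rw [pvNP, pv_mem_newPairs]
    refine ⟨by simp [PySem.Set.empty], ?_⟩
    rcases hm with hm | hm
    · exact ⟨((i : Int), x), (PySem.Set.mem_ofList _ _).mpr hm, hne,
        (pv_norm_eq_iff _ hne _ _).mpr (Or.inl rfl)⟩
    · exact ⟨(x, (i : Int)), (PySem.Set.mem_ofList _ _).mpr hm, fun hxy => hne hxy.symm,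
        (pv_norm_eq_iff _ (fun hxy => hne hxy.symm) _ _).mpr (Or.inr rfl)⟩

-- B's corrected rank equals A's winning count
theorem pv_scoreB_eq (friends gifts : List String) (h : friends ≠ []) (i : Nat)
    (hi : i < friends.length) :
    ((pvNP friends gifts).filterMap (pvSel (i : Int))).foldl
      (fun s j =>
        s + (if (pvDictB friends gifts).getD ((i : Int), j) 0 > (pvDictB friends gifts).getD (j, (i : Int)) 0
              ∨ ((pvDictB friends gifts).getD ((i : Int), j) 0 = (pvDictB friends gifts).getD (j, (i : Int)) 0
                 ∧ pvGidx friends gifts i > PySem.List.pyGetD (pvGiL friends gifts) j 0)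
            then 1 else 0)
          - (if PySem.List.pyGetD (pvGiL friends gifts) j 0 < pvGidx friends gifts i
             then 1 else 0))
      (((List.range friends.length).countP
          (fun j => decide (pvGidx friends gifts j < pvGidx friends gifts i)) : Int))
    = pvScore friends gifts i := by
  have hL := pv_nodup_filterMap_sel (i : Int) (pvNP friends gifts)
    (pv_newPairs_nodup _ _) (fun q hq => pv_newPairs_lt _ _ q hq)
  have hEnd : (((List.range friends.length).filter (pvExch friends gifts i)).map
      (fun (k : Nat) => (k : Int))).Nodup :=
    ((List.nodup_range).filter _).map Nat.cast_injective
  have hiff : ∀ x, x ∈ (pvNP friends gifts).filterMap (pvSel (i : Int))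
      ↔ x ∈ ((List.range friends.length).filter (pvExch friends gifts i)).map
          (fun (k : Nat) => (k : Int)) := by
    intro x
    rw [pv_memL friends gifts i x]
    constructor
    · rintro ⟨hne, hm⟩
      have hbx : 0 ≤ x ∧ x.toNat < friends.length := by
        rcases hm with hm | hm
        · exact (pv_ps_bound friends gifts h _ hm).2
        · exact (pv_ps_bound friends gifts h _ hm).1
      refine List.mem_map.mpr ⟨x.toNat, List.mem_filter.mpr ⟨List.mem_range.mpr hbx.2, ?_⟩, by omega⟩
      rw [pvExch, decide_eq_true_eq]
      have hxe : ((x.toNat : Nat) : Int) = x := by omega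
      exact ⟨fun hki => hne (by rw [← hxe, hki]), by rw [hxe]; exact hm⟩
    · intro hx
      obtain ⟨k, hkE, rfl⟩ := List.mem_map.mp hx
      have hex := (List.mem_filter.mp hkE).2
      rw [pvExch, decide_eq_true_eq] at hex
      exact ⟨fun hik => hex.1 (by exact_mod_cast hik.symm), hex.2⟩
  have hperm : ((pvNP friends gifts).filterMap (pvSel (i : Int))).Perm
      (((List.range friends.length).filter (pvExch friends gifts i)).map
        (fun (k : Nat) => (k : Int))) :=
    (List.perm_ext_iff_of_nodup hL hEnd).mpr hiff
  have hstep : ∀ (acc : Int), ∀ x ∈ (pvNP friends gifts).filterMap (pvSel (i : Int)),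
      (acc + (if (pvDictB friends gifts).getD ((i : Int), x) 0 > (pvDictB friends gifts).getD (x, (i : Int)) 0
              ∨ ((pvDictB friends gifts).getD ((i : Int), x) 0 = (pvDictB friends gifts).getD (x, (i : Int)) 0
                 ∧ pvGidx friends gifts i > PySem.List.pyGetD (pvGiL friends gifts) x 0)
            then (1 : Int) else 0)
          - (if PySem.List.pyGetD (pvGiL friends gifts) x 0 < pvGidx friends gifts i
             then (1 : Int) else 0))
      = acc + ((if (pvDictB friends gifts).getD ((i : Int), x) 0 > (pvDictB friends gifts).getD (x, (i : Int)) 0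
              ∨ ((pvDictB friends gifts).getD ((i : Int), x) 0 = (pvDictB friends gifts).getD (x, (i : Int)) 0
                 ∧ pvGidx friends gifts i > PySem.List.pyGetD (pvGiL friends gifts) x 0)
            then (1 : Int) else 0)
          - (if PySem.List.pyGetD (pvGiL friends gifts) x 0 < pvGidx friends gifts i
             then (1 : Int) else 0)) := by
    intro acc x _
    ring
  rw [PySem.List.foldl_congr_mem _ _ _ _ hstep, PySem.List.foldl_add]
  rw [List.Perm.sum_eq (List.Perm.map _ hperm), List.map_map]
  have hmapc : (((List.range friends.length).filter (pvExch friends gifts i)).map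
      ((fun j => (if (pvDictB friends gifts).getD ((i : Int), j) 0 > (pvDictB friends gifts).getD (j, (i : Int)) 0
              ∨ ((pvDictB friends gifts).getD ((i : Int), j) 0 = (pvDictB friends gifts).getD (j, (i : Int)) 0
                 ∧ pvGidx friends gifts i > PySem.List.pyGetD (pvGiL friends gifts) j 0)
            then (1 : Int) else 0)
          - (if PySem.List.pyGetD (pvGiL friends gifts) j 0 < pvGidx friends gifts i
             then (1 : Int) else 0)) ∘ (fun (k : Nat) => (k : Int))))
      = (((List.range friends.length).filter (pvExch friends gifts i)).map
          (fun (k : Nat) =>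
            (if pvC friends gifts i k > pvC friends gifts k i
              ∨ (pvC friends gifts i k = pvC friends gifts k i
                 ∧ pvGidx friends gifts i > pvGidx friends gifts k)
             then (1 : Int) else 0)
            - (if pvGidx friends gifts k < pvGidx friends gifts i then (1 : Int) else 0))) := by
    apply List.map_congr_left
    intro k hk
    have hkN : k < friends.length := List.mem_range.mp (List.mem_filter.mp hk).1
    simp only [Function.comp]
    rw [pv_cnt_getD, pv_cnt_getD, pv_gil friends gifts k hkN]
    rfl
  rw [hmapc, pv_sum_filter_eq]
  have hpoint : ∀ j ∈ List.range friends.length,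
      ((if pvGidx friends gifts j < pvGidx friends gifts i then (1 : Int) else 0)
        + (if pvExch friends gifts i j then
            ((if pvC friends gifts i j > pvC friends gifts j i
              ∨ (pvC friends gifts i j = pvC friends gifts j i
                 ∧ pvGidx friends gifts i > pvGidx friends gifts j)
             then (1 : Int) else 0)
            - (if pvGidx friends gifts j < pvGidx friends gifts i then (1 : Int) else 0))
           else 0))
      = (if pvWin friends gifts i j then (1 : Int) else 0) := by
    intro j hj
    by_cases hx : pvExch friends gifts i j = true
    · have hx' := hx
      rw [pvExch, decide_eq_true_eq] at hx'
      rw [if_pos hx, pvWin]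
      simp only [decide_eq_true_eq]
      have hne : i ≠ j := fun he => hx'.1 he.symm
      split_ifs <;> omega
    · have hx' := hx
      rw [pvExch, decide_eq_true_eq] at hx'
      rw [if_neg hx, pvWin]
      simp only [decide_eq_true_eq]
      by_cases hji : j = i
      · subst hji
        split_ifs <;> omega
      · have hnm1 : ((i : Int), (j : Int)) ∉ gifts.map (pvPk friends) := by
          intro hm
          exact hx' ⟨hji, Or.inl hm⟩
        have hnm2 : ((j : Int), (i : Int)) ∉ gifts.map (pvPk friends) := by
          intro hm
          exact hx' ⟨hji, Or.inr hm⟩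
        have hc1 : pvC friends gifts i j = 0 := by
          rw [pvC, List.count_eq_zero.mpr hnm1]
          rfl
        have hc2 : pvC friends gifts j i = 0 := by
          rw [pvC, List.count_eq_zero.mpr hnm2]
          rfl
        split_ifs <;> omega
  calc ((List.range friends.length).countP
          (fun j => decide (pvGidx friends gifts j < pvGidx friends gifts i)) : Int)
        + ((List.range friends.length).map (fun j =>
            if pvExch friends gifts i j then
              ((if pvC friends gifts i j > pvC friends gifts j i
                ∨ (pvC friends gifts i j = pvC friends gifts j i
                   ∧ pvGidx friends gifts i > pvGidx friends gifts j)
               then (1 : Int) else 0)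
              - (if pvGidx friends gifts j < pvGidx friends gifts i then (1 : Int) else 0))
            else 0)).sum
      = ((List.range friends.length).map (fun j =>
            if (fun j => decide (pvGidx friends gifts j < pvGidx friends gifts i)) j then (1 : Int) else 0)).sum
        + ((List.range friends.length).map (fun j =>
            if pvExch friends gifts i j then
              ((if pvC friends gifts i j > pvC friends gifts j i
                ∨ (pvC friends gifts i j = pvC friends gifts j i
                   ∧ pvGidx friends gifts i > pvGidx friends gifts j)
               then (1 : Int) else 0)
              - (if pvGidx friends gifts j < pvGidx friends gifts i then (1 : Int) else 0))
            else 0)).sum := by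
        rw [PySem.List.sum_map_ite_one_zero]
    _ = ((List.range friends.length).map (fun j =>
            (if pvGidx friends gifts j < pvGidx friends gifts i then (1 : Int) else 0)
            + (if pvExch friends gifts i j then
                ((if pvC friends gifts i j > pvC friends gifts j i
                  ∨ (pvC friends gifts i j = pvC friends gifts j i
                     ∧ pvGidx friends gifts i > pvGidx friends gifts j)
                 then (1 : Int) else 0)
                - (if pvGidx friends gifts j < pvGidx friends gifts i then (1 : Int) else 0))
               else 0))).sum := by
        rw [PySem.List.sum_map_add_int]
        refine congrArg (· + _) ?_
        apply congrArg
        apply List.map_congr_left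
        intro j _
        by_cases hj : pvGidx friends gifts j < pvGidx friends gifts i
        · rw [if_pos (by simpa using hj), if_pos hj]
        · rw [if_neg (by simpa using hj), if_neg hj]
    _ = ((List.range friends.length).map (fun j =>
            if pvWin friends gifts i j then (1 : Int) else 0)).sum := by
        apply congrArg
        exact List.map_congr_left hpoint
    _ = pvScore friends gifts i := by
        rw [PySem.List.sum_map_ite_one_zero, pvScore]

theorem pv_gil' (friends gifts : List String) (i : Nat) (hi : i < friends.length) :
    (pvGiL friends gifts).getD i 0 = pvGidx friends gifts i := by
  rw [pvGiL, PySem.List.getD_map_range _ _ _ _ hi]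

theorem pv_cnt1 (friends gifts : List String) (h : friends ≠ []) :
    (solutionAltCnt friends gifts).1 = pvDictB friends gifts := by
  rw [pv_cntstate friends gifts h]

theorem pv_cnt2 (friends gifts : List String) (h : friends ≠ []) :
    (solutionAltCnt friends gifts).2 = pvGiL friends gifts := by
  rw [pv_cntstate friends gifts h]

-- B's scores list is the win-count list
theorem pv_scores_eq (friends gifts : List String) (h : friends ≠ []) :
    (PySem.List.pyRange 0 (friends.length : Int) 1).foldl
      (fun scores i => scores ++
        [(PySem.List.pyGetD (solutionAltNbrs friends gifts).2 i []).foldl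
          (fun s j =>
            s + (if (solutionAltCnt friends gifts).1.getD (i, j) 0 >
                     (solutionAltCnt friends gifts).1.getD (j, i) 0
                  ∨ ((solutionAltCnt friends gifts).1.getD (i, j) 0 =
                       (solutionAltCnt friends gifts).1.getD (j, i) 0
                     ∧ PySem.List.pyGetD (solutionAltCnt friends gifts).2 i 0 >
                         PySem.List.pyGetD (solutionAltCnt friends gifts).2 j 0)
                 then 1 else 0)
              - (if PySem.List.pyGetD (solutionAltCnt friends gifts).2 j 0 <
                     PySem.List.pyGetD (solutionAltCnt friends gifts).2 i 0
                 then 1 else 0))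
          ((solutionAltFirst friends gifts).getD
            (PySem.List.pyGetD (solutionAltCnt friends gifts).2 i 0) 0)]) []
      = (List.range friends.length).map (pvScore friends gifts) := by
  rw [PySem.List.foldl_append_singleton_eq_map, List.nil_append,
      PySem.List.pyRange_zero_natCast, List.map_map]
  apply List.map_congr_left
  intro k hk
  have hkN : k < friends.length := List.mem_range.mp hk
  simp only [Function.comp]
  rw [pv_cnt1 friends gifts h, pv_cnt2 friends gifts h, pv_nbrs_eq friends gifts h]
  simp only [PySem.List.pyGetD_natCast]
  rw [PySem.List.getD_map_range _ _ _ _ hkN, pv_gil' friends gifts k hkN,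
      pv_first_eq friends gifts h k hkN]
  exact pv_scoreB_eq friends gifts h k hkN

-- B computes the maximum of the same score list
theorem pv_alt_eq (friends gifts : List String) (h : friends ≠ []) :
    solution_alt friends gifts
      = (PySem.List.max? ((List.range friends.length).map (pvScore friends gifts)) (fun x => x)).getD 0 := by
  rw [show solution_alt friends gifts
      = (PySem.List.max?
          ((PySem.List.pyRange 0 (friends.length : Int) 1).foldl
            (fun scores i => scores ++
              [(PySem.List.pyGetD (solutionAltNbrs friends gifts).2 i []).foldl
                (fun s j =>
                  s + (if (solutionAltCnt friends gifts).1.getD (i, j) 0 >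
                           (solutionAltCnt friends gifts).1.getD (j, i) 0
                        ∨ ((solutionAltCnt friends gifts).1.getD (i, j) 0 =
                             (solutionAltCnt friends gifts).1.getD (j, i) 0
                           ∧ PySem.List.pyGetD (solutionAltCnt friends gifts).2 i 0 >
                               PySem.List.pyGetD (solutionAltCnt friends gifts).2 j 0)
                       then 1 else 0)
                    - (if PySem.List.pyGetD (solutionAltCnt friends gifts).2 j 0 <
                           PySem.List.pyGetD (solutionAltCnt friends gifts).2 i 0
                       then 1 else 0))
                ((solutionAltFirst friends gifts).getD
                  (PySem.List.pyGetD (solutionAltCnt friends gifts).2 i 0) 0)]) [])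
          (fun x => x)).getD 0 from rfl,
      pv_scores_eq friends gifts h]

-- ===== VERDICT (by name: the statement is the Claim_ definition above) =====
theorem solution_spec : Claim_equal_solution := by
  intro friends gifts _ hpre
  show solution friends gifts = solution_alt friends gifts
  rw [pv_solution_eq friends gifts hpre.1, pv_alt_eq friends gifts hpre.1]
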